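-- pv_equiv track=rewrite | github.com/jobet1130/collatz-data-science | src/collatz/sequence.py | collatz_max_value
-- ===== SOURCE A (Python) =====
-- def collatz_max_value(n):
--     """
--     Find the maximum value reached in the Collatz sequence for a given starting number.
--
--     Args:
--         n (int): Starting number (must be positive)
--
--     Returns:
--         int: Maximum value reached in the sequence
--
--     Raises:
--         ValueError: If n is not a positive integer
--     """
--     if not isinstance(n, int) or n <= 0:
--         raise ValueError("Starting number must be a positive integer")
--
--     max_value = n
--     current = n
--
--     while current != 1:
--         if current > max_value:
--             max_value = current
--
--         if current % 2 == 0: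
--             current = current // 2
--         else:
--             current = 3 * current + 1
--
--     return max_value
-- ===== SOURCE B (Python) =====
-- def collatz_max_value(n):
--     if not isinstance(n, int) or n <= 0:
--         raise ValueError("Starting number must be a positive integer")
--     best = n
--     c = n
--     while c % 2 == 0:
--         c //= 2
--     while c != 1:
--         c = 3 * c + 1
--         if c > best:
--             best = c
--         while c % 2 == 0:
--             c //= 2
--     return best
-- ===== Notes on version B (the rewrite author's own statement) =====
-- stated objective: alternative
-- what changed: B iterates the Syracuse (odd-to-odd) map with a nested strip-all-factors-of-two loop, so only the 3c+1 peaks are ever compared as max candidates, instead of A's single-step loop with a running-maximum test on every visited value.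
-- outside the precondition, e.g. on collatz_max_value(0): A raises ValueError, B raises ValueError
import Mathlib
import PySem

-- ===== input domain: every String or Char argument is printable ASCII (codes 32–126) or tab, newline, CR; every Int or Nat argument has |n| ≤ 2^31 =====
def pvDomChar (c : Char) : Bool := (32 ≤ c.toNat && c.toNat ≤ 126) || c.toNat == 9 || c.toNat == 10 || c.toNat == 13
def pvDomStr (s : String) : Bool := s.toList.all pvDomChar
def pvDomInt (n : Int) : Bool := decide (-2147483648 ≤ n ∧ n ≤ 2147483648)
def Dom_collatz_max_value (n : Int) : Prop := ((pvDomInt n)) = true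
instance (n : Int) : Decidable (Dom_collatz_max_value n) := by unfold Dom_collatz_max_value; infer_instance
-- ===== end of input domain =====

-- B iterates the Syracuse (odd-to-odd) map: an inner loop strips every factor of two,
-- and only the 3c+1 peaks are compared against the best, instead of A's single-step
-- loop testing a running maximum at every visited value; same asymptotic cost.
-- Both loops are fuel-bounded in the ports (a port artifact: Collatz termination is
-- unproven in general); the equivalence is proved for every fuel alignment.

-- ===== PORT A =====
-- while current != 1: update running max, then one Collatz step
def collatzLoopA : Nat → Int → Int → Int
  | 0, _, max_value => max_value
  | fuel+1, current, max_value =>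
    if current = 1 then max_value
    else
      let max_value' := if current > max_value then current else max_value
      let current' := if PySem.Int.mod current 2 = 0 then PySem.Int.floordiv current 2
                      else 3 * current + 1
      collatzLoopA fuel current' max_value'

def collatz_max_value (n : Int) : Int := collatzLoopA 1000001 n n

-- ===== PORT B =====
-- inner loop: while c % 2 == 0: c //= 2  (fuel: one unit per halving; returns leftover fuel)
def stripTwos : Nat → Int → Int × Nat
  | 0, c => (c, 0)
  | f+1, c =>
    if PySem.Int.mod c 2 = 0 then stripTwos f (PySem.Int.floordiv c 2) else (c, f+1)

-- termination measure for the outer loop below (the strip loop never creates fuel)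
lemma stripTwos_fuel_le : ∀ (f : Nat) (c : Int), (stripTwos f c).2 ≤ f := by
  intro f
  induction f with
  | zero => intro c; simp [stripTwos]
  | succ f ih =>
      intro c
      rw [stripTwos]
      by_cases h : PySem.Int.mod c 2 = 0
      · rw [if_pos h]; exact Nat.le_succ_of_le (ih _)
      · rw [if_neg h]

-- outer loop: while c != 1: c = 3c+1; best = max; strip twos
def syracuseLoop (fuel : Nat) (c best : Int) : Int :=
  match fuel with
  | 0 => best
  | f+1 =>
    if c = 1 then best
    else
      let t := 3 * c + 1
      let best' := if t > best then t else best
      let p := stripTwos f t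
      syracuseLoop p.2 p.1 best'
termination_by fuel
decreasing_by exact Nat.lt_succ_of_le (stripTwos_fuel_le f (3 * c + 1))

def collatz_max_value_alt (n : Int) : Int :=
  let p := stripTwos 1000000 n
  syracuseLoop p.2 p.1 n

-- ===== PRECONDITION & SPEC =====
-- Python A raises ValueError on n ≤ 0; those inputs are excluded.
def Pre_collatz_max_value (n : Int) : Prop := 1 ≤ n
instance (n : Int) : Decidable (Pre_collatz_max_value n) := by unfold Pre_collatz_max_value; infer_instance
def pvWitness_collatz_max_value : Int := (7)

def Spec_collatz_max_value (n : Int) (out : Int) : Prop := out = collatz_max_value_alt n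
instance (n : Int) (out : Int) : Decidable (Spec_collatz_max_value n out) := by unfold Spec_collatz_max_value; infer_instance

-- ===== CLAIM (what is proved, stated in full; the proofs are below) =====
def Claim_equal_collatz_max_value : Prop := ∀ (n : Int), Dom_collatz_max_value n → Pre_collatz_max_value n → Spec_collatz_max_value n (collatz_max_value n)

-- ===== LEMMAS AND PROOFS =====

-- stripping twos keeps the value in [1, c], and stops at an odd value unless fuel ran out
lemma stripTwos_spec : ∀ (f : Nat) (c : Int), 1 ≤ c →
    1 ≤ (stripTwos f c).1 ∧ (stripTwos f c).1 ≤ c ∧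
      ((stripTwos f c).2 ≠ 0 → PySem.Int.mod (stripTwos f c).1 2 ≠ 0) := by
  intro f
  induction f with
  | zero => intro c hc; simp [stripTwos, hc]
  | succ f ih =>
      intro c hc
      by_cases h : PySem.Int.mod c 2 = 0
      · rw [PySem.Int.mod_eq_emod_of_pos (by norm_num)] at h
        have hc2 : (1 : Int) ≤ PySem.Int.floordiv c 2 := by
          rw [PySem.Int.floordiv_eq_ediv_of_pos (by norm_num)]; omega
        have hle : PySem.Int.floordiv c 2 ≤ c := by
          rw [PySem.Int.floordiv_eq_ediv_of_pos (by norm_num)]; omega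
        have h' : PySem.Int.mod c 2 = 0 := by
          rw [PySem.Int.mod_eq_emod_of_pos (by norm_num)]; exact h
        obtain ⟨h1, h2, h3⟩ := ih (PySem.Int.floordiv c 2) hc2
        rw [stripTwos, if_pos h']
        exact ⟨h1, le_trans h2 hle, h3⟩
      · rw [stripTwos, if_neg h]
        exact ⟨hc, le_refl c, fun _ => h⟩

-- A's loop over a run of halvings: the running max never changes (all values ≤ m),
-- and A consumes exactly one unit of fuel per halving, keeping one unit in hand.
lemma loopA_strip : ∀ (f : Nat) (c m : Int), 1 ≤ c → c ≤ m →
    collatzLoopA (f + 1) c m = collatzLoopA ((stripTwos f c).2 + 1) (stripTwos f c).1 m := by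
  intro f
  induction f with
  | zero => intro c m _ _; simp [stripTwos]
  | succ f ih =>
      intro c m hc hm
      by_cases h : PySem.Int.mod c 2 = 0
      · have he : c % 2 = 0 := by
          rw [PySem.Int.mod_eq_emod_of_pos (by norm_num)] at h; exact h
        have hne : c ≠ 1 := by omega
        have hdiv : PySem.Int.floordiv c 2 = c / 2 :=
          PySem.Int.floordiv_eq_ediv_of_pos (by norm_num)
        have hc2 : (1 : Int) ≤ PySem.Int.floordiv c 2 := by rw [hdiv]; omega
        have hle : PySem.Int.floordiv c 2 ≤ m := by rw [hdiv]; omega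
        have hmax : (if c > m then c else m) = m := if_neg (by omega)
        calc collatzLoopA (f + 1 + 1) c m
            = collatzLoopA (f + 1) (PySem.Int.floordiv c 2) m := by
              simp only [collatzLoopA, if_neg hne, if_pos h, hmax]
          _ = collatzLoopA ((stripTwos f (PySem.Int.floordiv c 2)).2 + 1)
                (stripTwos f (PySem.Int.floordiv c 2)).1 m := ih _ m hc2 hle
          _ = collatzLoopA ((stripTwos (f + 1) c).2 + 1) (stripTwos (f + 1) c).1 m := by
              rw [stripTwos, if_pos h]
      · rw [stripTwos, if_neg h]

-- main correspondence: B's Syracuse loop with fuel f equals A's loop with fuel f+1,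
-- provided best already dominates the (odd) current value.
lemma syracuse_eq_loopA : ∀ (f : Nat) (c best : Int), 1 ≤ c → c ≤ best →
    (PySem.Int.mod c 2 ≠ 0 ∨ f = 0) →
    syracuseLoop f c best = collatzLoopA (f + 1) c best := by
  intro f
  induction f using Nat.strong_induction_on with
  | _ f IH =>
    intro c best hc hb hpar
    match f with
    | 0 =>
        by_cases h1 : c = 1
        · simp [syracuseLoop, collatzLoopA, h1]
        · simp [syracuseLoop, collatzLoopA, h1, if_neg (show ¬ c > best by omega)]
    | g+1 =>
        by_cases h1 : c = 1
        · simp [syracuseLoop, collatzLoopA, h1]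
        · have hodd : PySem.Int.mod c 2 ≠ 0 := hpar.resolve_right (by omega)
          have ho : c % 2 = 1 := by
            rw [PySem.Int.mod_eq_emod_of_pos (by norm_num)] at hodd; omega
          have ht : PySem.Int.mod (3 * c + 1) 2 = 0 := by
            rw [PySem.Int.mod_eq_emod_of_pos (by norm_num)]; omega
          have htne : (3 : Int) * c + 1 ≠ 1 := by omega
          have hbest' : (if 3 * c + 1 > best then 3 * c + 1 else best) = max best (3 * c + 1) := by
            rw [max_def]; split_ifs <;> omega
          have hAstep : collatzLoopA (g + 1 + 1) c best = collatzLoopA (g + 1) (3 * c + 1) best := by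
            simp only [collatzLoopA, if_neg h1, if_neg hodd, if_neg (show ¬ c > best by omega)]
          rw [hAstep]
          rw [syracuseLoop]
          simp only [if_neg h1]
          match g with
          | 0 =>
              simp only [stripTwos]
              rw [syracuseLoop]
              simp only [collatzLoopA, if_neg htne]
          | h+1 =>
              have hdiv : PySem.Int.floordiv (3 * c + 1) 2 = (3 * c + 1) / 2 :=
                PySem.Int.floordiv_eq_ediv_of_pos (by norm_num)
              have hhalf1 : (1 : Int) ≤ PySem.Int.floordiv (3 * c + 1) 2 := by rw [hdiv]; omega
              have hhalfle : PySem.Int.floordiv (3 * c + 1) 2 ≤ max best (3 * c + 1) := by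
                rw [hdiv]; have := le_max_right best (3 * c + 1); omega
              -- A: one explicit step t → t/2 (updating best), then loopA_strip over the rest
              have hA2 : collatzLoopA (h + 1 + 1) (3 * c + 1) best
                  = collatzLoopA (h + 1) (PySem.Int.floordiv (3 * c + 1) 2) (max best (3 * c + 1)) := by
                simp only [collatzLoopA, if_neg htne, if_pos ht]
                rw [hbest']
              rw [hA2, loopA_strip h _ _ hhalf1 hhalfle]
              -- B: the strip call on t takes the same route
              have hstrip : stripTwos (h + 1) (3 * c + 1) = stripTwos h (PySem.Int.floordiv (3 * c + 1) 2) := by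
                rw [stripTwos, if_pos ht]
              obtain ⟨hs1, hs2, hs3⟩ := stripTwos_spec h (PySem.Int.floordiv (3 * c + 1) 2) hhalf1
              rw [hstrip, hbest']
              exact IH _ (Nat.lt_succ_of_le (Nat.le_succ_of_le (stripTwos_fuel_le h _))) _ _
                hs1 (le_trans hs2 hhalfle)
                (by by_cases hz : (stripTwos h (PySem.Int.floordiv (3 * c + 1) 2)).2 = 0
                    · exact Or.inr hz
                    · exact Or.inl (hs3 hz))

-- ===== VERDICT (by name: the statement is the Claim_ definition above) =====
theorem collatz_max_value_spec : Claim_equal_collatz_max_value := by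
  intro n _ hpre
  unfold Spec_collatz_max_value collatz_max_value collatz_max_value_alt
  obtain ⟨hs1, hs2, hs3⟩ := stripTwos_spec 1000000 n hpre
  rw [show (1000001 : Nat) = 1000000 + 1 from rfl,
      loopA_strip 1000000 n n hpre (le_refl n)]
  exact (syracuse_eq_loopA _ _ _ hs1 hs2
    (by by_cases hz : (stripTwos 1000000 n).2 = 0
        · exact Or.inr hz
        · exact Or.inl (hs3 hz))).symm
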